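-- pv_equiv track=rewrite | github.com/karinepestana/boku-engine | my_client.py | h_line
-- ===== SOURCE A (Python) =====
-- def h_line(board, player):
--
--     cont = 0
--     seq = 0
--
--     for line in range(len(board)):
--         state = board[line]
--         if state == player or state == 0:
--             if state == 0:
--             	cont += 1
--             else:
--             	seq += 1
--             if (cont + seq) == 5:
--             	if seq == 0:
--             		seq = 1
--             	return +10*seq
--         else:
--         	cont = 0
--         	seq = 0
--
--     return -1
-- ===== SOURCE B (Python) =====
-- def h_line(board, player):
--     def good(c):
--         return c == player or c == 0
--     i, n = 0, len(board)
--     while i < n: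
--         if not good(board[i]):
--             i += 1
--             continue
--         j = i
--         while j < n and good(board[j]):
--             j += 1
--         if j - i >= 5:
--             seq = sum(1 for c in board[i:i + 5] if c == player and c != 0)
--             return 10 * seq if seq else 10
--         i = j
--     return -1
-- ===== Notes on version B (the rewrite author's own statement) =====
-- stated objective: alternative
-- what changed: Replaces the cell-by-cell counter loop with reset (cont/seq accumulators) by a run-decomposition: find each maximal run of cells equal to player or 0, and for the first run of length >= 5 count the player cells among its first five cells.
import Mathlib
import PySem

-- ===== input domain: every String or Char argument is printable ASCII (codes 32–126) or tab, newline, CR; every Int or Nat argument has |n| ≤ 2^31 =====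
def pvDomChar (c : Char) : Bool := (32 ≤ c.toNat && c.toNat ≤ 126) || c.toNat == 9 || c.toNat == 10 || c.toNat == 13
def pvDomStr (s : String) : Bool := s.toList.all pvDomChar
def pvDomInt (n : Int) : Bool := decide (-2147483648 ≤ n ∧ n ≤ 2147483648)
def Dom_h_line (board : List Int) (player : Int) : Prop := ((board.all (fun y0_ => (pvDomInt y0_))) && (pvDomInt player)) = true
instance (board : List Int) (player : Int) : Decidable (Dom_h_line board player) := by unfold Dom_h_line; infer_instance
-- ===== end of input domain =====

-- B replaces A's counter-with-reset loop by a maximal-run decomposition; objective: alternative (same cost).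

-- ===== PORT A =====
-- A's for-loop over board indices, carried as structural recursion over the
-- list with the same (cont, seq) state and the same branch order; the early
-- `return +10*seq` is the value of that branch.
def h_lineLoop (player : Int) : List Int → Int → Int → Int
  | [], _, _ => -1
  | state :: rest, cont, seq =>
    if state = player ∨ state = 0 then
      let cont' := if state = 0 then cont + 1 else cont
      let seq' := if state = 0 then seq else seq + 1
      if cont' + seq' = 5 then
        if seq' = 0 then 10 * 1 else 10 * seq'
      else h_lineLoop player rest cont' seq'
    else h_lineLoop player rest 0 0

def h_line (board : List Int) (player : Int) : Int :=
  h_lineLoop player board 0 0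

-- ===== PORT B =====
-- Source B's `good` predicate
def pvGood (player : Int) (c : Int) : Bool := decide (c = player ∨ c = 0)

-- Source B's `seq = sum(1 for c in board[i:i+5] if c == player and c != 0)`
def pvSeqCount (player : Int) (run : List Int) : Int :=
  ((run.take 5).filter (fun c => decide (c = player ∧ c ≠ 0))).length

-- Source B's outer while-loop: skip a bad cell, or peel one maximal good run
-- (the inner `while j < n and good(board[j])` scan is takeWhile/dropWhile).
def h_lineAltLoop (player : Int) : List Int → Int
  | [] => -1
  | c :: rest =>
    if pvGood player c then
      let run := List.takeWhile (pvGood player) (c :: rest)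
      let rest' := List.dropWhile (pvGood player) (c :: rest)
      if 5 ≤ run.length then
        let seq := pvSeqCount player run
        if seq ≠ 0 then 10 * seq else 10
      else h_lineAltLoop player rest'
    else h_lineAltLoop player rest
termination_by l => l.length
decreasing_by
  · simp only [List.dropWhile_cons, *, if_pos]
    exact Nat.lt_succ_of_le (List.length_dropWhile_le _ _)
  · simp

def h_line_alt (board : List Int) (player : Int) : Int :=
  h_lineAltLoop player board

-- ===== PRECONDITION & SPEC =====
def Spec_h_line (board : List Int) (player : Int) (out : Int) : Prop := out = h_line_alt board player
instance (board : List Int) (player : Int) (out : Int) : Decidable (Spec_h_line board player out) := by unfold Spec_h_line; infer_instance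

-- ===== CLAIM (what is proved, stated in full; the proofs are below) =====
def Claim_equal_h_line : Prop := ∀ (board : List Int) (player : Int), Dom_h_line board player → Spec_h_line board player (h_line board player)

-- ===== LEMMAS AND PROOFS =====

-- count of zeros (A's cont) and of nonzero player cells (A's seq) in a good prefix
def pvC0 (p : List Int) : Int := (p.filter (fun c => decide (c = 0))).length
def pvCP (player : Int) (p : List Int) : Int :=
  (p.filter (fun c => decide (c = player ∧ c ≠ 0))).length

lemma pvC0_append (p : List Int) (x : Int) :
    pvC0 (p ++ [x]) = pvC0 p + (if x = 0 then 1 else 0) := by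
  simp [pvC0, List.filter_append]
  split_ifs with h <;> simp [h]

lemma pvCP_append (player : Int) (p : List Int) (x : Int) :
    pvCP player (p ++ [x]) = pvCP player p + (if x = player ∧ x ≠ 0 then 1 else 0) := by
  simp only [pvCP, List.filter_append, List.length_append]
  split_ifs with h
  · obtain ⟨h1, h2⟩ := h
    subst h1
    simp [h2]
  · push_neg at h
    have hf : (decide (x = player) && !decide (x = 0)) = false := by
      by_cases hp : x = player
      · subst hp; simp [h rfl]
      · simp [hp]
    simp [List.filter_cons, hf]

lemma pvC0_cons (a : Int) (t : List Int) :
    pvC0 (a :: t) = pvC0 t + (if a = 0 then 1 else 0) := by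
  by_cases h : a = 0 <;> simp [pvC0, List.filter_cons, h] <;> push_cast <;> ring

lemma pvCP_cons (player a : Int) (t : List Int) :
    pvCP player (a :: t) = pvCP player t + (if a = player ∧ a ≠ 0 then 1 else 0) := by
  by_cases h : a = player ∧ a ≠ 0
  · obtain ⟨h1, h2⟩ := h
    subst h1
    simp [pvCP, List.filter_cons, h2]
  · simp only [pvCP, List.filter_cons, decide_eq_true_eq, if_neg h]
    ring

lemma pvSum_len (player : Int) (p : List Int) (hg : ∀ x ∈ p, pvGood player x = true) :
    pvC0 p + pvCP player p = (p.length : Int) := by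
  induction p with
  | nil => simp [pvC0, pvCP]
  | cons a t ih =>
    have ha := hg a (by simp)
    have ih' := ih (fun x hx => hg x (List.mem_cons_of_mem _ hx))
    simp only [pvGood, decide_eq_true_eq] at ha
    have hl : ((a :: t).length : Int) = (t.length : Int) + 1 := by
      push_cast [List.length_cons]; ring
    rw [pvC0_cons, pvCP_cons, hl]
    split_ifs with h1 h2 <;> first | omega | (exfalso; tauto)

lemma takeWhile_append_all {q : Int → Bool} (p l : List Int)
    (h : ∀ x ∈ p, q x = true) :
    List.takeWhile q (p ++ l) = p ++ List.takeWhile q l := by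
  induction p with
  | nil => simp
  | cons a t ih =>
    have := h a (by simp)
    simp [List.takeWhile_cons, this, ih (fun x hx => h x (List.mem_cons_of_mem _ hx))]

lemma dropWhile_append_all {q : Int → Bool} (p l : List Int)
    (h : ∀ x ∈ p, q x = true) :
    List.dropWhile q (p ++ l) = List.dropWhile q l := by
  induction p with
  | nil => simp
  | cons a t ih =>
    have := h a (by simp)
    simp [List.dropWhile_cons, this, ih (fun x hx => h x (List.mem_cons_of_mem _ hx))]

-- invariant: A's loop with state accumulated over a good prefix p (|p| < 5)
-- computes B's run-decomposition on p ++ l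
lemma loop_eq (player : Int) : ∀ (l p : List Int),
    (∀ x ∈ p, pvGood player x = true) → p.length < 5 →
    h_lineLoop player l (pvC0 p) (pvCP player p) = h_lineAltLoop player (p ++ l) := by
  intro l
  induction l with
  | nil =>
    intro p hg hlen
    simp only [List.append_nil, h_lineLoop]
    cases p with
    | nil => simp [h_lineAltLoop]
    | cons a t =>
      rw [h_lineAltLoop]
      have ha := hg a (by simp)
      rw [if_pos ha]
      have htake := takeWhile_append_all (q := pvGood player) (a :: t) [] hg
      have hdrop := dropWhile_append_all (q := pvGood player) (a :: t) [] hg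
      simp only [List.takeWhile_nil, List.dropWhile_nil, List.append_nil] at htake hdrop
      rw [htake, hdrop]
      rw [if_neg (by omega)]
      simp [h_lineAltLoop]
  | cons x t ih =>
    intro p hg hlen
    by_cases hx : x = player ∨ x = 0
    · -- good cell
      have hgx : pvGood player x = true := by simp [pvGood, hx]
      have hg' : ∀ y ∈ p ++ [x], pvGood player y = true := by
        intro y hy
        rcases List.mem_append.mp hy with h | h
        · exact hg y h
        · simp at h; subst h; exact hgx
      have hC0 := pvC0_append p x
      have hCP := pvCP_append player p x
      have hcp_eq : (if x = 0 then pvCP player p else pvCP player p + 1) = pvCP player (p ++ [x]) := by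
        by_cases h0 : x = 0
        · rw [if_pos h0, hCP, if_neg (fun h => h.2 h0)]
          ring
        · have hp : x = player := hx.resolve_right h0
          rw [if_neg h0, hCP, if_pos ⟨hp, h0⟩]
      have hc0_eq : (if x = 0 then pvC0 p + 1 else pvC0 p) = pvC0 (p ++ [x]) := by
        by_cases h0 : x = 0
        · rw [if_pos h0, hC0, if_pos h0]
        · rw [if_neg h0, hC0, if_neg h0]
          ring
      have hsum := pvSum_len player (p ++ [x]) hg'
      rw [h_lineLoop, if_pos hx]
      simp only [hcp_eq, hc0_eq]
      by_cases h5 : pvC0 (p ++ [x]) + pvCP player (p ++ [x]) = 5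
      · -- run reaches 5 here: B's first run has length ≥ 5 with first five = p ++ [x]
        rw [if_pos h5]
        have hplen : (p ++ [x]).length = 5 := by
          have : ((p ++ [x]).length : Int) = 5 := by omega
          exact_mod_cast this
        have hassoc : p ++ x :: t = (p ++ [x]) ++ t := by simp
        rw [hassoc]
        obtain ⟨a, q, hq⟩ : ∃ a q, p ++ [x] = a :: q := by
          cases hpx : p ++ [x] with
          | nil => simp at hpx
          | cons a q => exact ⟨a, q, rfl⟩
        rw [hq, List.cons_append, h_lineAltLoop]
        have hga : pvGood player a = true := hg' a (by rw [hq]; simp)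
        rw [if_pos hga]
        rw [← List.cons_append, ← hq]
        rw [takeWhile_append_all _ _ hg']
        have hrunlen : 5 ≤ ((p ++ [x]) ++ List.takeWhile (pvGood player) t).length := by
          rw [List.length_append, hplen]
          omega
        rw [if_pos hrunlen]
        have htake5 : ((p ++ [x]) ++ List.takeWhile (pvGood player) t).take 5 = p ++ [x] := by
          rw [← hplen, List.take_left]
        have hseq : pvSeqCount player ((p ++ [x]) ++ List.takeWhile (pvGood player) t) = pvCP player (p ++ [x]) := by
          unfold pvSeqCount pvCP
          rw [htake5]
        rw [hseq]
        by_cases hz : pvCP player (p ++ [x]) = 0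
        · simp [hz]
        · simp [hz]
      · -- run not yet 5: recurse with prefix p ++ [x]
        rw [if_neg h5]
        have hlen' : (p ++ [x]).length < 5 := by
          have h1 : ((p ++ [x]).length : Int) = pvC0 (p ++ [x]) + pvCP player (p ++ [x]) := hsum.symm
          have h2 : pvC0 (p ++ [x]) + pvCP player (p ++ [x]) ≤ 5 := by
            have hle : (p.length : Int) ≤ 4 := by exact_mod_cast Nat.lt_succ_iff.mp hlen
            have : ((p ++ [x]).length : Int) = (p.length : Int) + 1 := by
              simp
            omega
          have : ((p ++ [x]).length : Int) < 5 := lt_of_le_of_ne (h1 ▸ h2) (h1 ▸ h5)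
          exact_mod_cast this
        have := ih (p ++ [x]) hg' hlen'
        rw [this]
        congr 1
        simp
    · -- bad cell: A resets; B's current run (if any) is too short, then skips x
      have hgx : pvGood player x = false := by
        simp [pvGood]; tauto
      rw [h_lineLoop, if_neg hx]
      have hres : h_lineAltLoop player (p ++ x :: t) = h_lineAltLoop player t := by
        cases p with
        | nil =>
          simp only [List.nil_append]
          rw [h_lineAltLoop, if_neg (by simp [hgx])]
        | cons a q =>
          have ha := hg a (by simp)
          rw [List.cons_append, h_lineAltLoop, if_pos ha]
          rw [← List.cons_append]
          rw [takeWhile_append_all _ _ hg, dropWhile_append_all _ _ hg]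
          rw [List.takeWhile_cons, List.dropWhile_cons]
          simp only [hgx]
          rw [if_neg (by simp [List.length_append] at hlen ⊢; omega)]
          simp only [Bool.false_eq_true, if_false]
          rw [h_lineAltLoop, if_neg (by simp [hgx])]
      rw [hres]
      have h0 : pvC0 ([] : List Int) = 0 := by simp [pvC0]
      have hP : pvCP player ([] : List Int) = 0 := by simp [pvCP]
      have := ih ([] : List Int) (by simp) (by simp)
      rw [h0, hP] at this
      simpa using this

-- ===== VERDICT (by name: the statement is the Claim_ definition above) =====
theorem h_line_spec : Claim_equal_h_line := by
  intro board player _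
  show h_line board player = h_line_alt board player
  have := loop_eq player board [] (by simp) (by simp)
  simpa [h_line, h_line_alt, pvC0, pvCP] using this
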